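-- pv_equiv track=rewrite | github.com/andreizzz/EulerProject | python/1-100/7_10001_prime.py | prime_numb
-- ===== SOURCE A (Python) =====
-- def is_prime(num):
--     '''Функция определения простого числа
--
--     Принимает на вход число, и проверяя его нечетность, путем перебора проверят все значени до квадратного корня этого числа. Скорость алгоритма О(n ** 0.5).
--     Возвращает булевое значение.'''
--     if num % 2 == 0:
--         return num == 2
--     d = 3
--     while d * d <= num and num % d != 0:
--         d += 2
--     return d * d > num
--
-- def prime_numb(num):
--     '''Функция поиска n-го простого числа
--
--     Путем перебора и проверки ищет простое n-ое число
--     Возвращает число.'''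
--     count = 0 # счетчик простых чисел
--     prime_num = 1 # стартовое простое число
--     while count != num: # цикл поиска n-го числа по нечетным числам
--         if is_prime(prime_num):
--             count += 1
--             prime_num += 2
--         else:
--             prime_num += 2
--     return prime_num - 2 #возвращаем предыдуще число
-- ===== SOURCE B (Python) =====
-- def prime_numb(num):
--     # sequence: 1 prepended, then the odd primes 3, 5, 7, 11, ...
--     if num == 0:
--         return -1
--     if num == 1:
--         return 1
--     primes = []          # odd primes found so far, ascending
--     cand = 3
--     while len(primes) < num - 1:
--         is_p = True
--         for p in primes:
--             if p * p > cand: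
--                 break
--             if cand % p == 0:
--                 is_p = False
--                 break
--         if is_p:
--             primes.append(cand)
--         cand += 2
--     return primes[-1]
-- ===== Notes on version B (the rewrite author's own statement) =====
-- stated objective: faster
-- what changed: B maintains the ascending list of odd primes found so far and tests each odd candidate only against those primes up to its square root (with 1 and the missing 2 handled as explicit base cases), instead of A's trial division of every candidate by all odd numbers up to its square root.
import Mathlib
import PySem

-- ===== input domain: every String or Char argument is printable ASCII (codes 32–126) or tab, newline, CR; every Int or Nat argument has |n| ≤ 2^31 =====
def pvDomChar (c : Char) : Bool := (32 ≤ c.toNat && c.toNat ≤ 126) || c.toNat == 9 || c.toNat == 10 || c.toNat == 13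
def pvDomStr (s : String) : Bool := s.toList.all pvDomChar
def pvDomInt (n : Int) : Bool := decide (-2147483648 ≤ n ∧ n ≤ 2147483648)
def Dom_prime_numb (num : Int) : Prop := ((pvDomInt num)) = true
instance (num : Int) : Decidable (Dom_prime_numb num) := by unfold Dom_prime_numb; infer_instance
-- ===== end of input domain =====

-- B replaces A's per-candidate trial division by all odd numbers with trial division by the
-- list of odd primes found so far (1 and the excluded 2 become base cases); return value only.

-- ===== PORT A =====
-- is_prime's while loop: while d*d <= num and c % d != 0: d += 2; return d*d > num
def isPrimeALoop (num : Int) (d : Int) : Bool :=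
  if d * d ≤ num ∧ num % d ≠ 0 then isPrimeALoop num (d + 2)
  else decide (num < d * d)
termination_by (num + 1 - d).toNat
decreasing_by
  have hd : d ≤ num := by nlinarith [sq_nonneg d]
  omega

def isPrimeA (num : Int) : Bool :=
  if num % 2 = 0 then num == 2 else isPrimeALoop num 3

-- prime_numb's while loop: while count != num. The loop searches an unbounded space, so it is
-- written with a fuel parameter; fuel 2^(num+2)+1 exceeds the iteration count (Bertrand), and
-- the fuel-exhausted branch (return 0) is unreachable in the Python.
def loopA (num : Int) (fuel : Nat) (count : Int) (prime_num : Int) : Int :=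
  if count = num then prime_num - 2
  else match fuel with
    | 0 => 0
    | f + 1 =>
      if isPrimeA prime_num then loopA num f (count + 1) (prime_num + 2)
      else loopA num f count (prime_num + 2)

def prime_numb (num : Int) : Int :=
  loopA num (2 ^ (num.toNat + 2) + 1) 0 1

-- ===== PORT B =====
-- B's inner for-loop over `primes` with its two breaks (p*p > cand, and cand % p == 0)
def allNotDvd (cand : Int) : List Int → Bool
  | [] => true
  | p :: ps =>
    if p * p > cand then true
    else if cand % p = 0 then false
    else allNotDvd cand ps

-- while len(primes) < num - 1; fuel as in port A (exhaustion branch unreachable).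
-- primes[-1] on the empty list (IndexError, only reachable for num < 0, outside Pre_) → 0.
def loopB (num : Int) (fuel : Nat) (primes : List Int) (cand : Int) : Int :=
  if (primes.length : Int) < num - 1 then
    match fuel with
    | 0 => 0
    | f + 1 =>
      if allNotDvd cand primes then loopB num f (primes ++ [cand]) (cand + 2)
      else loopB num f primes (cand + 2)
  else (PySem.List.pyGet? primes (-1)).getD 0

def prime_numb_alt (num : Int) : Int :=
  if num = 0 then -1
  else if num = 1 then 1
  else loopB num (2 ^ (num.toNat + 2)) [] 3

-- ===== PRECONDITION & SPEC =====
-- A's while loop never terminates for num < 0 (count only grows from 0), so Pre_ is num ≥ 0.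
def Pre_prime_numb (num : Int) : Prop := 0 ≤ num
instance (num : Int) : Decidable (Pre_prime_numb num) := by unfold Pre_prime_numb; infer_instance
def pvWitness_prime_numb : Int := (5)

def Spec_prime_numb (num : Int) (out : Int) : Prop := out = prime_numb_alt num
instance (num : Int) (out : Int) : Decidable (Spec_prime_numb num out) := by unfold Spec_prime_numb; infer_instance

-- ===== CLAIM (what is proved, stated in full; the proofs are below) =====
def Claim_equal_prime_numb : Prop := ∀ (num : Int), Dom_prime_numb num → Pre_prime_numb num → Spec_prime_numb num (prime_numb num)

-- ===== LEMMAS AND PROOFS =====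

-- the ascending list of odd primes below c (the spec of B's `primes` accumulator)
def oddPrimesBelow (c : Int) : List Int :=
  ((List.range c.toNat).filter (fun n => decide (Nat.Prime n) && decide (n ≠ 2))).map (fun n => Int.ofNat n)

lemma mem_oddPrimesBelow {c p : Int} :
    p ∈ oddPrimesBelow c ↔ ∃ n : Nat, (n : Int) < c ∧ Nat.Prime n ∧ n ≠ 2 ∧ p = (n : Int) := by
  unfold oddPrimesBelow
  simp only [List.mem_map, List.mem_filter, List.mem_range, Bool.and_eq_true,
    decide_eq_true_eq, Int.ofNat_eq_natCast]
  constructor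
  · rintro ⟨n, ⟨hn, hp, h2⟩, rfl⟩
    exact ⟨n, by omega, hp, h2, rfl⟩
  · rintro ⟨n, hn, hp, h2, rfl⟩
    exact ⟨n, ⟨by omega, hp, h2⟩, rfl⟩

-- A's inner loop characterization
lemma isPrimeALoop_iff (c : Int) : ∀ d : Int, 3 ≤ d → d % 2 = 1 →
    (isPrimeALoop c d = true ↔ ∀ e : Int, d ≤ e → e % 2 = 1 → e * e ≤ c → c % e ≠ 0) := by
  intro d
  induction d using isPrimeALoop.induct (num := c) with
  | case1 d hif ih =>
    intro hd3 hodd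
    rw [isPrimeALoop, if_pos hif]
    rw [ih (by omega) (by omega)]
    constructor
    · intro h e hde heodd hee
      rcases lt_or_ge e (d + 2) with hlt | hge
      · have : e = d ∨ e = d + 1 := by omega
        rcases this with rfl | rfl
        · exact hif.2
        · omega
      · exact h e hge heodd hee
    · intro h e hde heodd hee
      exact h e (by omega) heodd hee
  | case2 d hif =>
    intro hd3 hodd
    rw [isPrimeALoop, if_neg hif]
    push Not at hif
    by_cases hlt : c < d * d
    · simp only [decide_eq_true_eq, hlt, true_iff]
      intro e hde heodd hee hmod
      have : d * d ≤ e * e := mul_le_mul hde hde (by omega) (by omega)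
      omega
    · have hdd : d * d ≤ c := by omega
      have hmod : c % d = 0 := hif hdd
      simp only [decide_eq_true_eq]
      constructor
      · intro h; omega
      · intro h
        exact absurd hmod (h d le_rfl hodd hdd)

-- is_prime on an odd candidate ≥ 3 decides primality
-- shared facts about the least prime factor of an odd composite
lemma minFac_facts {n : Nat} (hn3 : 3 ≤ n) (hnodd : n % 2 = 1) (hnp : ¬ Nat.Prime n) :
    Nat.Prime n.minFac ∧ n.minFac ∣ n ∧ n.minFac * n.minFac ≤ n ∧
      n.minFac ≠ 2 ∧ 3 ≤ n.minFac ∧ n.minFac % 2 = 1 ∧ n.minFac < n := by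
  have hq := Nat.minFac_prime (show n ≠ 1 by omega)
  have hqd := Nat.minFac_dvd n
  have hsq : n.minFac * n.minFac ≤ n := by
    have := Nat.minFac_sq_le_self (show 0 < n by omega) hnp
    simpa [pow_two] using this
  have hq2 : n.minFac ≠ 2 := by
    intro h
    have : 2 ∣ n := h ▸ hqd
    omega
  have hqodd : n.minFac % 2 = 1 := by
    rcases hq.eq_two_or_odd with h | h
    · exact absurd h hq2
    · exact h
  have hq3 : 3 ≤ n.minFac := by
    have := hq.two_le
    omega
  have hqlt : n.minFac < n := by nlinarith
  exact ⟨hq, hqd, hsq, hq2, hq3, hqodd, hqlt⟩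

lemma isPrimeA_iff_prime {c : Int} (hc : 3 ≤ c) (hodd : c % 2 = 1) :
    isPrimeA c = true ↔ Nat.Prime c.toNat := by
  have hne : c % 2 ≠ 0 := by omega
  rw [isPrimeA, if_neg hne, isPrimeALoop_iff c 3 (by omega) (by omega)]
  set n := c.toNat with hn
  have hcast : (n : Int) = c := Int.toNat_of_nonneg (by omega)
  have hn3 : 3 ≤ n := by omega
  have hnodd : n % 2 = 1 := by omega
  constructor
  · intro hall
    by_contra hnp
    obtain ⟨hq, hqd, hsq, hq2, hq3, hqodd, hqlt⟩ := minFac_facts hn3 hnodd hnp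
    have hmodc : c % (n.minFac : Int) = 0 := by
      have h1 : (n : Int) % (n.minFac : Int) = ((n % n.minFac : Nat) : Int) :=
        (Int.natCast_mod n n.minFac).symm
      rw [← hcast, h1, Nat.mod_eq_zero_of_dvd hqd]
      rfl
    refine hall (n.minFac : Int) (by exact_mod_cast hq3) (by omega) ?_ hmodc
    rw [← hcast]
    exact_mod_cast hsq
  · intro hp e he3 heodd hee hmodc
    have hecast : ((e.toNat : Int)) = e := Int.toNat_of_nonneg (by omega)
    have hdvd : e.toNat ∣ n := by
      have h1 : e ∣ c := Int.dvd_of_emod_eq_zero hmodc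
      rw [← hcast, ← hecast] at h1
      exact_mod_cast h1
    rcases hp.eq_one_or_self_of_dvd e.toNat hdvd with h1 | h1
    · omega
    · have hee' : e.toNat * e.toNat ≤ n := by
        have : ((e.toNat : Int)) * ((e.toNat : Int)) ≤ (n : Int) := by
          rw [hecast, hcast]; exact hee
        exact_mod_cast this
      nlinarith [hee', h1, hn3]

lemma allNotDvd_primes_iff_prime {c : Int} (hc : 3 ≤ c) (hodd : c % 2 = 1) :
    (∀ p ∈ oddPrimesBelow c, p * p ≤ c → c % p ≠ 0) ↔ Nat.Prime c.toNat := by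
  set n := c.toNat with hn
  have hcast : (n : Int) = c := Int.toNat_of_nonneg (by omega)
  have hn3 : 3 ≤ n := by omega
  have hnodd : n % 2 = 1 := by omega
  constructor
  · intro hall
    by_contra hnp
    obtain ⟨hq, hqd, hsq, hq2, hq3, hqodd, hqlt⟩ := minFac_facts hn3 hnodd hnp
    have hmem : ((n.minFac : Int)) ∈ oddPrimesBelow c :=
      mem_oddPrimesBelow.2 ⟨n.minFac, by omega, hq, hq2, rfl⟩
    have hmodc : c % (n.minFac : Int) = 0 := by
      have h1 : (n : Int) % (n.minFac : Int) = ((n % n.minFac : Nat) : Int) :=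
        (Int.natCast_mod n n.minFac).symm
      rw [← hcast, h1, Nat.mod_eq_zero_of_dvd hqd]
      rfl
    refine hall (n.minFac : Int) hmem ?_ hmodc
    rw [← hcast]
    exact_mod_cast hsq
  · intro hp p hmem hpp hmodc
    obtain ⟨q, hqc, hqp, hq2, rfl⟩ := mem_oddPrimesBelow.1 hmem
    have hdvd : q ∣ n := by
      have h1 : (q : Int) ∣ c := Int.dvd_of_emod_eq_zero hmodc
      rw [← hcast] at h1
      exact_mod_cast h1
    rcases hp.eq_one_or_self_of_dvd q hdvd with h1 | h1
    · exact absurd h1 (by have := hqp.two_le; omega)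
    · have : (q : Int) < (n : Int) := by rw [hcast]; exact hqc
      omega

-- on an ascending list of nonnegative values the breaks lose nothing
lemma allNotDvd_iff (c : Int) : ∀ l : List Int, l.Pairwise (· ≤ ·) → (∀ p ∈ l, 0 ≤ p) →
    (allNotDvd c l = true ↔ ∀ p ∈ l, p * p ≤ c → c % p ≠ 0) := by
  intro l
  induction l with
  | nil => simp [allNotDvd]
  | cons p ps ih =>
    intro hpw hnn
    rcases List.pairwise_cons.1 hpw with ⟨hle, hpw'⟩
    have hp0 : 0 ≤ p := hnn p (List.mem_cons_self ..)
    simp only [allNotDvd, List.mem_cons]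
    by_cases hgt : p * p > c
    · rw [if_pos hgt]
      constructor
      · rintro _ q (rfl | hq) hqq
        · omega
        · exfalso
          have h1 : p ≤ q := hle q hq
          have : p * p ≤ q * q := mul_le_mul h1 h1 hp0 (by omega)
          omega
      · intro _; rfl
    · rw [if_neg hgt]
      by_cases hdvd : c % p = 0
      · rw [if_pos hdvd]
        constructor
        · intro h; exact absurd h (by simp)
        · intro h
          exact absurd hdvd (h p (Or.inl rfl) (by omega))
      · rw [if_neg hdvd]
        rw [ih hpw' (fun q hq => hnn q (List.mem_cons_of_mem _ hq))]
        constructor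
        · rintro h q (rfl | hq)
          · intro _; exact hdvd
          · exact h q hq
        · intro h q hq
          exact h q (Or.inr hq)

lemma oddPrimesBelow_sorted (c : Int) : (oddPrimesBelow c).Pairwise (· ≤ ·) := by
  unfold oddPrimesBelow
  refine List.Pairwise.map _ ?_ ((List.pairwise_lt_range.filter _).imp le_of_lt)
  intro a b hab
  simpa using (Int.ofNat_le.2 hab)

lemma oddPrimesBelow_nonneg (c : Int) : ∀ p ∈ oddPrimesBelow c, 0 ≤ p := by
  intro p hp
  obtain ⟨n, _, _, _, rfl⟩ := mem_oddPrimesBelow.1 hp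
  exact Int.natCast_nonneg n

-- pointwise agreement of the two primality tests, given the invariant
lemma test_agree {c : Int} (hc : 3 ≤ c) (hodd : c % 2 = 1) :
    isPrimeA c = allNotDvd c (oddPrimesBelow c) := by
  have h1 := isPrimeA_iff_prime hc hodd
  have h2 := (allNotDvd_iff c (oddPrimesBelow c) (oddPrimesBelow_sorted c)
    (oddPrimesBelow_nonneg c)).trans (allNotDvd_primes_iff_prime hc hodd)
  cases ha : isPrimeA c <;> cases hb : allNotDvd c (oddPrimesBelow c) <;> simp_all

lemma oddPrimesBelow_step {c : Int} (hc : 3 ≤ c) (hodd : c % 2 = 1) :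
    oddPrimesBelow (c + 2) = oddPrimesBelow c ++ (if Nat.Prime c.toNat then [c] else []) := by
  have h2 : (c + 2).toNat = (c.toNat + 1) + 1 := by omega
  have hnotp : ¬ Nat.Prime (c.toNat + 1) := by
    intro hp
    rcases hp.eq_two_or_odd with h | h
    · omega
    · omega
  have hcast : ((c.toNat : Int)) = c := Int.toNat_of_nonneg (by omega)
  unfold oddPrimesBelow
  rw [h2, List.range_succ, List.range_succ, List.filter_append, List.filter_append,
    List.map_append, List.map_append]
  by_cases hp : Nat.Prime c.toNat
  · have hne2 : c.toNat ≠ 2 := by omega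
    simp [hp, hne2, hnotp, hcast]
  · simp [hp, hnotp]

-- lockstep loop equivalence
lemma loop_eq (num : Int) : ∀ (f : Nat) (primes : List Int) (c : Int),
    3 ≤ c → c % 2 = 1 →
    primes = oddPrimesBelow c →
    (primes.length : Int) ≤ num - 1 →
    ((primes.length : Int) = num - 1 → primes.getLast? = some (c - 2)) →
    loopA num f ((primes.length : Int) + 1) c = loopB num f primes c := by
  intro f
  induction f with
  | zero =>
    intro primes c hc hodd hinv hlen hlast
    rw [loopA, loopB]
    by_cases hx : (primes.length : Int) + 1 = num
    · rw [if_pos hx, if_neg (show ¬((primes.length : Int) < num - 1) from by omega)]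
      rw [PySem.List.pyGet?_neg_one, hlast (by omega)]
      rfl
    · rw [if_neg hx, if_pos (show (primes.length : Int) < num - 1 from by omega)]
  | succ f ih =>
    intro primes c hc hodd hinv hlen hlast
    rw [loopA, loopB]
    by_cases hx : (primes.length : Int) + 1 = num
    · rw [if_pos hx, if_neg (show ¬((primes.length : Int) < num - 1) from by omega)]
      rw [PySem.List.pyGet?_neg_one, hlast (by omega)]
      rfl
    · rw [if_neg hx, if_pos (show (primes.length : Int) < num - 1 from by omega)]
      have htest : allNotDvd c primes = isPrimeA c := by rw [hinv, test_agree hc hodd]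
      rw [htest]
      by_cases hp : isPrimeA c = true
      · rw [if_pos hp, if_pos hp]
        have hprime : Nat.Prime c.toNat := (isPrimeA_iff_prime hc hodd).1 hp
        have h1 := ih (primes ++ [c]) (c + 2) (by omega) (by omega)
          (by rw [oddPrimesBelow_step hc hodd, if_pos hprime, hinv])
          (by simp only [List.length_append, List.length_cons, List.length_nil]; push_cast; omega)
          (by intro _; rw [List.getLast?_concat]; congr 1; omega)
        simpa using h1
      · rw [if_neg hp, if_neg hp]
        have hnprime : ¬ Nat.Prime c.toNat := fun h => hp ((isPrimeA_iff_prime hc hodd).2 h)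
        exact ih primes (c + 2) (by omega) (by omega)
          (by rw [oddPrimesBelow_step hc hodd, if_neg hnprime, List.append_nil, hinv])
          hlen (fun h => absurd h (by omega))

lemma loopA_step {num : Int} {f : Nat} {count c : Int} (h : ¬ count = num) :
    loopA num (f + 1) count c =
      if isPrimeA c then loopA num f (count + 1) (c + 2) else loopA num f count (c + 2) := by
  rw [loopA, if_neg h]

lemma isPrimeA_one : isPrimeA 1 = true := by
  rw [isPrimeA, if_neg (by norm_num), isPrimeALoop, if_neg (by norm_num)]
  decide

lemma oddPrimesBelow_three : oddPrimesBelow 3 = [] := by decide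

-- ===== VERDICT (by name: the statement is the Claim_ definition above) =====
theorem prime_numb_spec : Claim_equal_prime_numb := by
  unfold Claim_equal_prime_numb
  intro num _ hpre
  unfold Spec_prime_numb
  by_cases h0 : num = 0
  · subst h0; decide
  by_cases h1 : num = 1
  · subst h1
    rw [prime_numb, prime_numb_alt]
    rw [loopA_step (by norm_num), isPrimeA_one, if_pos rfl]
    rw [loopA.eq_def, if_pos (show (0:Int) + 1 = 1 from by norm_num)]
    norm_num
  · have hnum2 : 2 ≤ num := by unfold Pre_prime_numb at hpre; omega
    rw [prime_numb, prime_numb_alt, if_neg h0, if_neg h1]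
    rw [loopA_step (by omega), isPrimeA_one, if_pos rfl]
    have h := loop_eq num (2 ^ (num.toNat + 2)) [] 3 (by norm_num) (by norm_num)
      oddPrimesBelow_three.symm
      (by simp only [List.length_nil]; push_cast; omega)
      (fun h => absurd h (by simp only [List.length_nil]; push_cast; omega))
    simpa using h
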